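-- pv_equiv track=rewrite | github.com/alexbass112/Empathica | empathica/applications/empathica/modules/GraphComprehension.py | gen_assignments
-- ===== SOURCE A (Python) =====
-- def gen_assignments(concs,valences):
--     a_set = []
--     base_a = {}
--
--     #Start with the 'worst' assignment
--     for c in concs:
--         if concs[c] > 0:
--             base_a[c] = False
--         else:
--             base_a[c] = True
--     a_set.append(dict(base_a))
--     for (valence,id) in valences:
--         base_a[id] = not base_a[id]
--         a_set.append(dict(base_a))
--     return a_set
-- ===== SOURCE B (Python) =====
-- def gen_assignments(concs, valences):
--     # Column-wise via an inverted index: first the steps at which each concept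
--     # flips, then each concept's whole boolean column, rows assembled last.
--     flips = {c: [] for c in concs}
--     for k, (_, i) in enumerate(valences):
--         flips[i].append(k)
--     m = len(valences)
--     cols = {}
--     for c, v in concs.items():
--         col = [v <= 0]
--         for k in range(m):
--             col.append(col[-1] ^ (k in flips[c]))
--         cols[c] = col
--     return [{c: cols[c][k] for c in cols} for k in range(m + 1)]
-- ===== Notes on version B (the rewrite author's own statement) =====
-- stated objective: alternative
-- what changed: A walks row-wise, toggling one key of a shared mutable dict per valence and appending a copy; B works column-wise: it first inverts the valence list into a per-concept index of flip steps, builds each concept's whole boolean column from that index, and assembles the output rows by step index last.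
import Mathlib
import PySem

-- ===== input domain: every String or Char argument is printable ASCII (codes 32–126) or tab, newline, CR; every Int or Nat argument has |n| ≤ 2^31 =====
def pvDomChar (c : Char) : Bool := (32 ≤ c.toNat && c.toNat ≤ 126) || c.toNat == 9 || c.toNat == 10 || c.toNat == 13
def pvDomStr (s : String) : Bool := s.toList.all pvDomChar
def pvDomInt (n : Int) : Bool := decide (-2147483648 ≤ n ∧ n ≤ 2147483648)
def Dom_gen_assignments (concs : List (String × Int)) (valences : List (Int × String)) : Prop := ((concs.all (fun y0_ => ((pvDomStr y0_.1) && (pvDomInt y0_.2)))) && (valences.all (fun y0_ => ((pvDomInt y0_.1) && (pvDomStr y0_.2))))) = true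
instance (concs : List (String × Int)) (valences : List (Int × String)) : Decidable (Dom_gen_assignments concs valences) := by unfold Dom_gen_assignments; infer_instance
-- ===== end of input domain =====

-- B is column-wise instead of row-wise: it first inverts the valence list into a per-concept
-- index of flip steps, builds each concept's whole boolean column from it, and assembles the
-- rows by index last.

-- ===== PORT A =====
-- 'concs' is a Python dict: PySem.Dict.ofList gives last-value-wins, first-position key order.
-- 's.2.getD p.2 false': Python raises KeyError when p.2 is not a key; Pre_ excludes exactly
-- those inputs, so the default is never read on admitted inputs.
def gen_assignments (concs : List (String × Int)) (valences : List (Int × String)) : List (List (String × Bool)) :=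
  let d := PySem.Dict.ofList concs
  let base_a : PySem.Dict String Bool :=
    d.keys.foldl (fun b c => b.insert c (if d.getD c 0 > 0 then false else true)) PySem.Dict.empty
  let st := valences.foldl
    (fun (s : List (List (String × Bool)) × PySem.Dict String Bool) p =>
      let b' := s.2.insert p.2 (! s.2.getD p.2 false)
      (s.1 ++ [b'.items], b'))
    ([base_a.items], base_a)
  st.1

-- ===== PORT B =====
-- Source B's dicts are carried in insertion order: 'flips' is a PySem.Dict, 'cols' is its items
-- list; 'col[-1]' is PySem.List.pyGetD at -1, 'k in flips[c]' is List.contains, 'cols[c][k]'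
-- is PySem.List.pyGetD at the (always in-range) index k.
def gen_assignments_alt (concs : List (String × Int)) (valences : List (Int × String)) : List (List (String × Bool)) :=
  let flips0 : PySem.Dict String (List Int) :=
    (PySem.Dict.ofList concs).keys.foldl (fun f c => f.insert c []) PySem.Dict.empty
  -- Python's flips[i].append(k) raises KeyError when i is not a key; Pre_ excludes exactly
  -- those inputs, so Dict.modify's insert-on-missing branch is never reached on admitted inputs.
  let flips := (PySem.List.enumerate valences).foldl
      (fun f p => f.modify p.2.2 [] (fun l => l ++ [p.1])) flips0
  let m := valences.length
  let cols := (PySem.Dict.ofList concs).items.map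
    (fun p => (p.1,
      (PySem.List.pyRange 0 (m : Int)).foldl
        (fun col k => col ++ [((PySem.List.pyGetD col (-1) false) ^^ ((flips.getD p.1 []).contains k))])
        [decide (p.2 ≤ 0)]))
  (List.range (m + 1)).map
    (fun (k : Nat) => cols.map (fun q => (q.1, PySem.List.pyGetD q.2 (k : Int) false)))

-- ===== PRECONDITION & SPEC =====
-- Pre_ excludes exactly the inputs where the Python A raises KeyError: a valence id that is not a key of concs.
def Pre_gen_assignments (concs : List (String × Int)) (valences : List (Int × String)) : Prop :=
  ∀ p ∈ valences, p.2 ∈ (PySem.Dict.ofList concs).keys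
instance (concs : List (String × Int)) (valences : List (Int × String)) : Decidable (Pre_gen_assignments concs valences) := by unfold Pre_gen_assignments; infer_instance

def pvWitness_gen_assignments : (List (String × Int)) × (List (Int × String)) :=
  ([("a", 1), ("b", -2)], [(3, "a"), (0, "b"), (-1, "a")])

def Spec_gen_assignments (concs : List (String × Int)) (valences : List (Int × String)) (out : List (List (String × Bool))) : Prop := out = gen_assignments_alt concs valences
instance (concs : List (String × Int)) (valences : List (Int × String)) (out : List (List (String × Bool))) : Decidable (Spec_gen_assignments concs valences out) := by unfold Spec_gen_assignments; infer_instance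

-- ===== CLAIM (what is proved, stated in full; the proofs are below) =====
def Claim_equal_gen_assignments : Prop := ∀ (concs : List (String × Int)) (valences : List (Int × String)), Dom_gen_assignments concs valences → Pre_gen_assignments concs valences → Spec_gen_assignments concs valences (gen_assignments concs valences)

-- ===== LEMMAS AND PROOFS =====

-- toggling one key of a row
def pvStepRow (r : List (String × Bool)) (i : String) : List (String × Bool) :=
  r.map (fun p => (p.1, p.2 ^^ (p.1 == i)))

-- the successive rows produced by toggling ids one after another
def pvRowsFrom (r : List (String × Bool)) : List String → List (List (String × Bool))
  | [] => []
  | i :: is => pvStepRow r i :: pvRowsFrom (pvStepRow r i) is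

-- the boolean time series of one concept c, starting after value b
def pvColFrom (c : String) (b : Bool) : List String → List Bool
  | [] => []
  | i :: is => (b ^^ (i == c)) :: pvColFrom c (b ^^ (i == c)) is

theorem pvBeqComm (a b : String) : (a == b) = (b == a) := by
  by_cases h : a = b
  · simp [h]
  · simp [h, Ne.symm h]

theorem pvGet?_eq_lookup (d : PySem.Dict String Bool) (k : String) :
    d.get? k = List.lookup k d.items := by
  rcases d with ⟨l⟩
  induction l with
  | nil => rfl
  | cons p rest ih =>
    rw [show (PySem.Dict.mk (p :: rest)).items = p :: rest from rfl, List.lookup_cons]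
    rcases p with ⟨a, v⟩
    rw [PySem.Dict.get?_mk_cons]
    by_cases h : a = k
    · simp [h]
    · have hk : (k == a) = false := beq_eq_false_iff_ne.mpr (fun e => h e.symm)
      simp [h, hk, ih]

theorem pvLookup_of_nodup (l : List (String × Bool)) (i : String) (x : Bool)
    (hnd : (l.map Prod.fst).Nodup) (hm : (i, x) ∈ l) : List.lookup i l = some x := by
  induction l with
  | nil => simp at hm
  | cons p rest ih =>
    rcases List.mem_cons.mp hm with h | h
    · rw [← h]; simp
    · have hne : i ≠ p.1 := by
        intro e
        have : p.1 ∈ rest.map Prod.fst := List.mem_map.mpr ⟨(i, x), h, e⟩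
        exact (List.nodup_cons.mp hnd).1 this
      rw [List.lookup_cons]
      have : (i == p.1) = false := beq_eq_false_iff_ne.mpr hne
      rw [this]
      exact ih (List.nodup_cons.mp hnd).2 h

-- A's in-place toggle, seen on the items list, flips exactly the key i
theorem pvItemsToggle (b : PySem.Dict String Bool) (i : String)
    (hnd : b.keys.Nodup) (hc : b.contains i = true) :
    (b.insert i (! b.getD i false)).items = pvStepRow b.items i := by
  rw [PySem.Dict.items_insert_of_contains _ _ hc]
  unfold pvStepRow
  refine List.map_congr_left ?_
  intro p hp
  by_cases h : p.1 = i
  · have hget : b.get? i = some p.2 := by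
      rw [pvGet?_eq_lookup]
      exact pvLookup_of_nodup _ _ _ hnd (by rw [← h]; exact hp)
    have : b.getD i false = p.2 := by rw [PySem.Dict.getD_eq_get?_getD, hget]; rfl
    simp [h, this]
  · have : (p.1 == i) = false := beq_eq_false_iff_ne.mpr h
    simp [this]

-- A's loop appends exactly the successive toggled rows
theorem pvLoopA (vs : List (Int × String)) (b : PySem.Dict String Bool)
    (rows : List (List (String × Bool)))
    (hnd : b.keys.Nodup) (hv : ∀ p ∈ vs, p.2 ∈ b.keys) :
    (vs.foldl
      (fun (s : List (List (String × Bool)) × PySem.Dict String Bool) p =>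
        let b' := s.2.insert p.2 (! s.2.getD p.2 false)
        (s.1 ++ [b'.items], b'))
      (rows, b)).1
    = rows ++ pvRowsFrom b.items (vs.map (fun p => p.2)) := by
  induction vs generalizing b rows with
  | nil => simp [pvRowsFrom]
  | cons q vs ih =>
    have hmem : q.2 ∈ b.keys := hv q (by simp)
    have hcont : b.contains q.2 = true := by
      rw [PySem.Dict.contains_iff_mem_keys]; exact hmem
    simp only [List.foldl_cons, List.map_cons, pvRowsFrom]
    rw [pvItemsToggle b q.2 hnd hcont] at *
    have hkeys : (b.insert q.2 (! b.getD q.2 false)).keys = b.keys :=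
      PySem.Dict.keys_insert_of_contains _ _ hcont
    rw [ih (b.insert q.2 (! b.getD q.2 false)) (rows ++ [pvStepRow b.items q.2])
        (by rw [hkeys]; exact hnd)
        (fun p hp => by rw [hkeys]; exact hv p (List.mem_cons_of_mem _ hp)),
      pvItemsToggle b q.2 hnd hcont, List.append_assoc]
    rfl

-- B's column fold is the prefix-parity series
theorem pvColFold (c : String) (ids : List String) (acc : List Bool) (hne : acc ≠ []) :
    ids.foldl (fun col i => col ++ [((PySem.List.pyGetD col (-1) false) ^^ (i == c))]) acc
    = acc ++ pvColFrom c (acc.getLast hne) ids := by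
  induction ids generalizing acc with
  | nil => simp [pvColFrom]
  | cons i is ih =>
    simp only [List.foldl_cons]
    rw [PySem.List.pyGetD_neg_one acc false hne,
      ih (acc ++ [acc.getLast hne ^^ (i == c)]) (by simp)]
    simp [pvColFrom, List.append_assoc]

-- row-wise and column-wise traversals produce the same table
theorem pvTranspose (ids : List String) (r : List (String × Bool)) :
    pvRowsFrom r ids
    = (List.range ids.length).map
        (fun k => r.map (fun p => (p.1, (pvColFrom p.1 p.2 ids).getD k false))) := by
  induction ids generalizing r with
  | nil => simp [pvRowsFrom]
  | cons i is ih =>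
    simp only [pvRowsFrom, List.length_cons, List.range_succ_eq_map, List.map_cons,
      List.map_map]
    congr 1
    · unfold pvStepRow
      refine (List.map_congr_left ?_).symm
      intro p _
      simp [pvColFrom, pvBeqComm i p.1]
    · rw [ih (pvStepRow r i)]
      refine (List.map_congr_left ?_).symm
      intro k _
      simp only [Function.comp_apply]
      unfold pvStepRow
      rw [List.map_map]
      refine List.map_congr_left ?_
      intro p _
      simp [pvColFrom, pvBeqComm i p.1]

-- the init dict of the flip index maps every key to []
theorem pvFlips0GetD (keys : List String) (d : PySem.Dict String (List Int))
    (h : ∀ y, d.getD y [] = []) (x : String) :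
    (keys.foldl (fun f c => f.insert c ([] : List Int)) d).getD x [] = [] := by
  induction keys generalizing d with
  | nil => exact h x
  | cons c cs ih =>
    simp only [List.foldl_cons]
    refine ih _ (fun y => ?_)
    rw [PySem.Dict.getD_insert]
    split
    · rfl
    · exact h y

-- the flip index at c is exactly the list of steps whose valence id is c
theorem pvFlipsChar (concs : List (String × Int)) (valences : List (Int × String)) (c : String) :
    ((PySem.List.enumerate valences).foldl
        (fun f p => f.modify p.2.2 [] (fun l => l ++ [p.1]))
        ((PySem.Dict.ofList concs).keys.foldl (fun f x => f.insert x ([] : List Int)) PySem.Dict.empty)).getD c []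
    = (PySem.List.pyRange 0 (valences.length : Int)).filter
        (fun j => (PySem.List.pyGetD valences j ((0 : Int), "")).2 == c) := by
  have h1 : ((PySem.List.enumerate valences).map (fun p => ((p.2.2 : String), (p.1 : Int)))).foldl
        (fun f q => f.modify q.1 [] (fun l => l ++ [q.2]))
        ((PySem.Dict.ofList concs).keys.foldl (fun f x => f.insert x ([] : List Int)) PySem.Dict.empty)
      = (PySem.List.enumerate valences).foldl
          (fun f p => f.modify p.2.2 [] (fun l => l ++ [p.1]))
          ((PySem.Dict.ofList concs).keys.foldl (fun f x => f.insert x ([] : List Int)) PySem.Dict.empty) :=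
    List.foldl_map
  rw [← h1, PySem.Dict.getD_foldl_modify_append,
    pvFlips0GetD _ _ (fun y => rfl) c, List.nil_append,
    PySem.List.enumerate_eq_map_pyRange valences ((0 : Int), "")]
  simp only [List.map_map, List.filter_map, Function.comp_def]
  simp

-- the column fold over step indices is the column fold over the ids themselves
theorem pvColConv (concs : List (String × Int)) (valences : List (Int × String)) (c : String) (b0 : Bool) :
    (PySem.List.pyRange 0 (valences.length : Int)).foldl
      (fun col k => col ++ [((PySem.List.pyGetD col (-1) false) ^^
          ((((PySem.List.enumerate valences).foldl
              (fun f p => f.modify p.2.2 [] (fun l => l ++ [p.1]))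
              ((PySem.Dict.ofList concs).keys.foldl (fun f x => f.insert x ([] : List Int)) PySem.Dict.empty)).getD c []).contains k))])
      [b0]
    = (valences.map (fun p => p.2)).foldl
        (fun col i => col ++ [((PySem.List.pyGetD col (-1) false) ^^ (i == c))]) [b0] := by
  rw [← PySem.List.foldl_pyRange_zero_pyGetD' (valences.map (fun p => p.2)) ""
      (fun col i => col ++ [((PySem.List.pyGetD col (-1) false) ^^ (i == c))]) [b0],
    List.length_map]
  refine PySem.List.foldl_congr_mem _ _ _ _ ?_
  intro col k hk
  rw [pvFlipsChar]
  have hmap : PySem.List.pyGetD (valences.map (fun p => p.2)) k "" = (PySem.List.pyGetD valences k ((0 : Int), "")).2 :=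
    PySem.List.pyGetD_map (fun p => p.2) valences k ((0 : Int), "")
  have hcont : ((PySem.List.pyRange 0 (valences.length : Int)).filter
        (fun j => (PySem.List.pyGetD valences j ((0 : Int), "")).2 == c)).contains k
      = ((PySem.List.pyGetD valences k ((0 : Int), "")).2 == c) := by
    rw [Bool.eq_iff_iff]
    constructor
    · intro hcy
      exact (List.mem_filter.mp (List.contains_iff_mem.mp hcy)).2
    · intro hp
      exact List.contains_iff_mem.mpr (List.mem_filter.mpr ⟨hk, hp⟩)
  rw [hcont, hmap]

-- B, reduced: the base row followed by the successive toggled rows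
theorem pvAltEq (concs : List (String × Int)) (valences : List (Int × String)) :
    gen_assignments_alt concs valences
    = (PySem.Dict.ofList concs).items.map (fun p => (p.1, decide (p.2 ≤ 0)))
      :: pvRowsFrom ((PySem.Dict.ofList concs).items.map (fun p => (p.1, decide (p.2 ≤ 0))))
          (valences.map (fun p => p.2)) := by
  simp only [gen_assignments_alt]
  simp only [pvColConv]
  rw [pvTranspose, List.range_succ_eq_map, List.map_cons, List.map_map]
  simp only [List.length_map]
  congr 1
  · refine List.map_congr_left ?_
    intro p _
    rw [Function.comp_apply, pvColFold p.1 _ _ (by simp)]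
    simp
  · rw [List.map_map]
    refine List.map_congr_left ?_
    intro k _
    rw [Function.comp_apply, List.map_map, List.map_map]
    refine List.map_congr_left ?_
    intro p _
    rw [Function.comp_apply, Function.comp_apply, pvColFold p.1 _ _ (by simp)]
    rw [PySem.List.pyGetD_natCast]
    simp [List.getD]

-- ===== VERDICT (by name: the statements are the Claim_ definitions above) =====
theorem gen_assignments_spec : Claim_equal_gen_assignments := by
  intro concs valences _ hpre
  unfold Spec_gen_assignments gen_assignments
  have hnd : (PySem.Dict.ofList concs).keys.Nodup := PySem.Dict.nodup_keys_ofList concs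
  have hbase : ((PySem.Dict.ofList concs).keys.foldl
      (fun b c => b.insert c (if (PySem.Dict.ofList concs).getD c 0 > 0 then false else true))
      PySem.Dict.empty).items
      = (PySem.Dict.ofList concs).keys.map
        (fun c => (c, if (PySem.Dict.ofList concs).getD c 0 > 0 then false else true)) := by
    have h := PySem.Dict.items_foldl_insert_fresh
      (l := (PySem.Dict.ofList concs).keys) (k := fun c => c)
      (v := fun c => if (PySem.Dict.ofList concs).getD c 0 > 0 then false else true)
      (d := (PySem.Dict.empty : PySem.Dict String Bool))
      (by intro a _; simp) (by simp)
    simpa using h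
  have hbk : ((PySem.Dict.ofList concs).keys.foldl
      (fun b c => b.insert c (if (PySem.Dict.ofList concs).getD c 0 > 0 then false else true))
      PySem.Dict.empty).keys = (PySem.Dict.ofList concs).keys := by
    rw [show ∀ (d : PySem.Dict String Bool), d.keys = d.items.map (fun p => p.1) from fun _ => rfl,
        hbase, List.map_map]
    simp [Function.comp_def]
  have hfirst : ((PySem.Dict.ofList concs).keys.foldl
      (fun b c => b.insert c (if (PySem.Dict.ofList concs).getD c 0 > 0 then false else true))
      PySem.Dict.empty).items
      = (PySem.Dict.ofList concs).items.map (fun p => (p.1, decide (p.2 ≤ 0))) := by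
    rw [hbase, PySem.Dict.items_eq_map_keys (PySem.Dict.ofList concs) hnd 0, List.map_map]
    refine List.map_congr_left ?_
    intro c _
    simp only [Function.comp_def]
    by_cases h : (PySem.Dict.ofList concs).getD c 0 ≤ 0 <;>
      simp [h, (by omega : ((PySem.Dict.ofList concs).getD c 0 > 0) ↔ ¬ ((PySem.Dict.ofList concs).getD c 0 ≤ 0))]
  rw [pvLoopA valences _ _ (by rw [hbk]; exact hnd) (fun p hp => by rw [hbk]; exact hpre p hp),
    hfirst, pvAltEq]
  rfl
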